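-- pv_equiv track=rewrite | github.com/aarushirai234/monitoringReddit | app.py | count_category
-- ===== SOURCE A (Python) =====
-- def count_category(posts, category_name):
--     aliases = {
--         "bug": {"bug", "bugs", "issue", "issues", "bugs & issues", "bugs / issues"},
--         "feature request": {"feature request", "feature requests"},
--         "complaint": {"complaint", "complaints"},
--     }
--
--     valid_labels = aliases.get(category_name.lower(), {category_name.lower()})
--
--     return sum(
--         1
--         for p in posts
--         if p.get("category", "").strip().lower() in valid_labels
--     )
-- ===== SOURCE B (Python) =====
-- def count_category(posts, category_name):
--     key = category_name.lower()
--     groups = [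
--         ("bug", ["bug", "bugs", "issue", "issues", "bugs & issues", "bugs / issues"]),
--         ("feature request", ["feature request", "feature requests"]),
--         ("complaint", ["complaint", "complaints"]),
--     ]
--     valid_labels = next((labels for name, labels in groups if name == key), [key])
--     freq = {}
--     for p in posts:
--         c = p.get("category", "").strip().lower()
--         freq[c] = freq.get(c, 0) + 1
--     return sum(freq.get(label, 0) for label in valid_labels)
-- ===== Notes on version B (the rewrite author's own statement) =====
-- stated objective: alternative
-- what changed: B builds a frequency table of normalized categories in one pass over the posts and then sums the counts of the few valid labels, instead of testing each post's category for set membership.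
import Mathlib
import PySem

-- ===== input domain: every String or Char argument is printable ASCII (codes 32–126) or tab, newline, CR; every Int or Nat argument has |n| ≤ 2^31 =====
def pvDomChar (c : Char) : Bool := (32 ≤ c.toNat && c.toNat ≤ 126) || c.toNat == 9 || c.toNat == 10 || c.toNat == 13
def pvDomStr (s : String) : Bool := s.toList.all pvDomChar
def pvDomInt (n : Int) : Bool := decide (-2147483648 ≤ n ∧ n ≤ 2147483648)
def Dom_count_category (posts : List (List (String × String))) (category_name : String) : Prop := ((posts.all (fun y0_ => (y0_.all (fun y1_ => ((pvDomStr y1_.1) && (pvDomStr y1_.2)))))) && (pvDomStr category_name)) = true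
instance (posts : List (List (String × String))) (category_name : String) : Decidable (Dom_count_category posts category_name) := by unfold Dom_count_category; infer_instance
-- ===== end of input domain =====

-- B builds a frequency table of normalized categories in one pass and then sums the
-- counts of the few valid labels, instead of a per-post set-membership test (alternative decomposition).


-- the alias table, shared module-level data of both programs
def pvAliases : PySem.Dict String (PySem.Set String) := PySem.Dict.ofList
  [("bug", PySem.Set.ofList ["bug", "bugs", "issue", "issues", "bugs & issues", "bugs / issues"]),
   ("feature request", PySem.Set.ofList ["feature request", "feature requests"]),
   ("complaint", PySem.Set.ofList ["complaint", "complaints"])]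

-- p.get("category", "").strip().lower()
def pvNorm (p : List (String × String)) : String :=
  PySem.Str.lower (PySem.Str.strip (PySem.Dict.getD (PySem.Dict.mk p) "category" ""))

-- ===== PORT A =====
def count_category (posts : List (List (String × String))) (category_name : String) : Int :=
  let valid_labels : PySem.Set String :=
    PySem.Dict.getD pvAliases (PySem.Str.lower category_name)
      (PySem.Set.ofList [PySem.Str.lower category_name])
  posts.foldl (fun acc p => if PySem.Set.contains valid_labels (pvNorm p) then acc + 1 else acc) 0

-- ===== PORT B =====
def pvGroups : List (String × List String) :=
  [("bug", ["bug", "bugs", "issue", "issues", "bugs & issues", "bugs / issues"]),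
   ("feature request", ["feature request", "feature requests"]),
   ("complaint", ["complaint", "complaints"])]

def count_category_alt (posts : List (List (String × String))) (category_name : String) : Int :=
  let key := PySem.Str.lower category_name
  let valid_labels : List String :=
    ((pvGroups.find? (fun g => g.1 == key)).map (fun g => g.2)).getD [key]
  let freq : PySem.Dict String Int :=
    posts.foldl (fun d p => let c := pvNorm p; d.insert c (d.getD c 0 + 1)) PySem.Dict.empty
  valid_labels.foldl (fun acc label => acc + freq.getD label 0) 0

-- ===== PRECONDITION & SPEC =====
def Spec_count_category (posts : List (List (String × String))) (category_name : String) (out : Int) : Prop := out = count_category_alt posts category_name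
instance (posts : List (List (String × String))) (category_name : String) (out : Int) : Decidable (Spec_count_category posts category_name out) := by unfold Spec_count_category; infer_instance

-- ===== CLAIM (what is proved, stated in full; the proofs are below) =====
def Claim_equal_count_category : Prop := ∀ (posts : List (List (String × String))) (category_name : String), Dom_count_category posts category_name → Spec_count_category posts category_name (count_category posts category_name)

-- ===== LEMMAS AND PROOFS =====

-- B's label list is exactly A's label set (and so duplicate-free)
lemma aliases_mk : pvAliases = PySem.Dict.mk
    [("bug", PySem.Set.ofList ["bug", "bugs", "issue", "issues", "bugs & issues", "bugs / issues"]),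
     ("feature request", PySem.Set.ofList ["feature request", "feature requests"]),
     ("complaint", PySem.Set.ofList ["complaint", "complaints"])] := by rfl

lemma valid_labels_eq (k : String) :
    ((pvGroups.find? (fun g => g.1 == k)).map (fun g => g.2)).getD [k]
      = PySem.Dict.getD pvAliases k (PySem.Set.ofList [k]) := by
  rw [aliases_mk]
  by_cases h1 : ("bug" == k) = true
  · simp only [pvGroups, List.find?, h1, PySem.Dict.getD_eq_get?_getD, PySem.Dict.get?_mk_cons]
    simp
    decide
  · have e1 : ("bug" == k) = false := by simpa using h1
    by_cases h2 : ("feature request" == k) = true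
    · simp only [pvGroups, List.find?, e1, h2, PySem.Dict.getD_eq_get?_getD,
        PySem.Dict.get?_mk_cons]
      simp
      decide
    · have e2 : ("feature request" == k) = false := by simpa using h2
      by_cases h3 : ("complaint" == k) = true
      · simp only [pvGroups, List.find?, e1, e2, h3, PySem.Dict.getD_eq_get?_getD,
          PySem.Dict.get?_mk_cons]
        simp
        decide
      · have e3 : ("complaint" == k) = false := by simpa using h3
        simp only [pvGroups, List.find?, e1, e2, e3, PySem.Dict.getD_eq_get?_getD,
          PySem.Dict.get?_mk_cons]
        simp [PySem.Dict.get?, PySem.Set.ofList, PySem.Set.add]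

lemma nodup_valid_labels (k : String) :
    (((pvGroups.find? (fun g => g.1 == k)).map (fun g => g.2)).getD [k]).Nodup := by
  rw [valid_labels_eq, aliases_mk]
  simp only [PySem.Dict.getD_eq_get?_getD, PySem.Dict.get?_mk_cons]
  split_ifs <;> exact PySem.Set.nodup_ofList _

-- countP of "equals l or is in ls" splits when l ∉ ls
lemma countP_or_disj (ns : List String) (l : String) (ls : List String) (h : l ∉ ls) :
    ns.countP (fun x => x == l || ls.contains x)
      = ns.count l + ns.countP (fun x => ls.contains x) := by
  induction ns with
  | nil => simp
  | cons x ns ih =>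
    simp only [List.countP_cons, List.count_cons, ih]
    by_cases hx : x = l
    · subst hx
      simp [h]
      omega
    · have hb : (x == l) = false := by simpa using hx
      simp [hb]
      omega

-- summing per-label counts over a duplicate-free label list = one membership countP
lemma foldl_count_eq_countP (labels ns : List String) (h : labels.Nodup) (a : Int) :
    labels.foldl (fun acc l => acc + (ns.count l : Int)) a
      = a + (ns.countP (fun x => labels.contains x) : Int) := by
  induction labels generalizing a with
  | nil => simp
  | cons l ls ih =>
    rcases List.nodup_cons.mp h with ⟨hl, hls⟩
    rw [List.foldl_cons, ih hls]
    have := countP_or_disj ns l ls hl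
    have hc : ∀ x, (l :: ls).contains x = (x == l || ls.contains x) := fun x => List.contains_cons
    simp only [hc]
    rw [this]
    push_cast
    ring

theorem count_category_spec_aux (posts : List (List (String × String))) (category_name : String) :
    count_category posts category_name = count_category_alt posts category_name := by
  unfold count_category count_category_alt
  simp only []
  rw [PySem.List.foldl_if_add_one]
  have hfreq : ∀ v : String,
      (posts.foldl (fun d p => (d.insert (pvNorm p) (d.getD (pvNorm p) 0 + 1))) PySem.Dict.empty).getD v 0
        = ((posts.map pvNorm).count v : Int) := by
    intro v
    rw [← List.foldl_map (f := pvNorm)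
        (g := fun (d : PySem.Dict String Int) c => d.insert c (d.getD c 0 + 1))]
    rw [PySem.Dict.getD_foldl_insert_add_one]
    simp [PySem.Dict.getD_eq_get?_getD, PySem.Dict.get?, PySem.Dict.empty]
  simp only [hfreq]
  rw [foldl_count_eq_countP _ _ (nodup_valid_labels _)]
  rw [valid_labels_eq, List.countP_map]
  simp [Function.comp_def, PySem.Set.contains, zero_add]

-- ===== VERDICT (by name: the statement is the Claim_ definition above) =====
theorem count_category_spec : Claim_equal_count_category := by
  intro posts category_name _
  unfold Spec_count_category
  exact count_category_spec_aux posts category_name
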